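-- pv_equiv track=rewrite | github.com/dylanjkennedy/GameDataMiner | GameDataMiner.py | count_sacks
-- ===== SOURCE A (Python) =====
-- def count_sacks(plays, winner, loser):
--     sacks = [0, 0]
--     for play in plays:
--         if play['sack'] != None:
--             if play['defense'] == winner:
--                 sacks[0] = sacks[0] + 1
--             else:
--                 sacks[1] = sacks[1] + 1
--     return sacks
-- ===== SOURCE B (Python) =====
-- def count_sacks(plays, winner, loser):
--     return [sum(1 for play in plays
--                 if play['sack'] is not None and play['defense'] == winner),
--             sum(1 for play in plays
--                 if play['sack'] is not None and play['defense'] != winner)]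
-- ===== Notes on version B (the rewrite author's own statement) =====
-- stated objective: simpler
-- what changed: Replaces the single loop mutating a two-slot list with two independent filtered-count passes (sum over generator expressions), one per entry; the unused 'loser' parameter plays no role.
import Mathlib
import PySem

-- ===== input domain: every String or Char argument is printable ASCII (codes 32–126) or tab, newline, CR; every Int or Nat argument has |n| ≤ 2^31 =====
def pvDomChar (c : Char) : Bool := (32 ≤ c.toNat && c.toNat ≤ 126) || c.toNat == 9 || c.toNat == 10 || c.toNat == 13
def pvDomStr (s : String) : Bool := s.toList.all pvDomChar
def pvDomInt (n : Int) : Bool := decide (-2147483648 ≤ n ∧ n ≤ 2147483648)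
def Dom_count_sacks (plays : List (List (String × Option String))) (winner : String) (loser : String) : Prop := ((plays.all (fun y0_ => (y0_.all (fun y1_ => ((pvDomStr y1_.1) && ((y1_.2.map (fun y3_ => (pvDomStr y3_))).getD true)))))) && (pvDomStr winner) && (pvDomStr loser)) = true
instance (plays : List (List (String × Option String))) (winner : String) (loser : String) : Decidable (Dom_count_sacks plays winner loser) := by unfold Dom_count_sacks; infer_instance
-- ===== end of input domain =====

-- B replaces A's single loop mutating a two-slot list with two independent filtered-count
-- passes, one per entry (objective: simpler). Return-value equivalence on Pre_ (no KeyError).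

-- ===== PORT A =====
-- play['k'] on the association list = first-match lookup; .getD none is only reached
-- under Pre_ (key present), so it is exact there.
def count_sacks (plays : List (List (String × Option String))) (winner : String) (loser : String) : List Int :=
  let p := plays.foldl (fun (sacks : Int × Int) play =>
    if ((PySem.Dict.mk play).get? "sack").getD none != none then
      if ((PySem.Dict.mk play).get? "defense").getD none == some winner then
        (sacks.1 + 1, sacks.2)
      else
        (sacks.1, sacks.2 + 1)
    else sacks) ((0 : Int), (0 : Int))
  [p.1, p.2]

-- ===== PORT B =====
def count_sacks_alt (plays : List (List (String × Option String))) (winner : String) (loser : String) : List Int :=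
  [ ((plays.countP (fun play =>
        ((PySem.Dict.mk play).get? "sack").getD none != none &&
        ((PySem.Dict.mk play).get? "defense").getD none == some winner) : Nat) : Int),
    ((plays.countP (fun play =>
        ((PySem.Dict.mk play).get? "sack").getD none != none &&
        ((PySem.Dict.mk play).get? "defense").getD none != some winner) : Nat) : Int) ]

-- ===== PRECONDITION & SPEC =====
-- Pre_ excludes exactly the inputs where Python A raises KeyError: a play without a
-- 'sack' key, or a play whose sack is not None but which lacks a 'defense' key.
def Pre_count_sacks (plays : List (List (String × Option String))) (winner : String) (loser : String) : Prop :=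
  ∀ play ∈ plays, (PySem.Dict.mk play).get? "sack" ≠ none ∧
    ((PySem.Dict.mk play).get? "sack" ≠ some none → (PySem.Dict.mk play).get? "defense" ≠ none)
instance (plays : List (List (String × Option String))) (winner : String) (loser : String) : Decidable (Pre_count_sacks plays winner loser) := by unfold Pre_count_sacks; infer_instance

def pvWitness_count_sacks : (List (List (String × Option String))) × String × String :=
  ([[("sack", some "x"), ("defense", some "w")], [("sack", none)]], "w", "l")

def Spec_count_sacks (plays : List (List (String × Option String))) (winner : String) (loser : String) (out : List Int) : Prop := out = count_sacks_alt plays winner loser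
instance (plays : List (List (String × Option String))) (winner : String) (loser : String) (out : List Int) : Decidable (Spec_count_sacks plays winner loser out) := by unfold Spec_count_sacks; infer_instance

-- ===== CLAIM (what is proved, stated in full; the proofs are below) =====
def Claim_equal_count_sacks : Prop := ∀ (plays : List (List (String × Option String))) (winner : String) (loser : String), Dom_count_sacks plays winner loser → Pre_count_sacks plays winner loser → Spec_count_sacks plays winner loser (count_sacks plays winner loser)

-- ===== LEMMAS AND PROOFS =====
theorem count_sacks_fold (winner : String) (plays : List (List (String × Option String))) (a b : Int) :
    plays.foldl (fun (sacks : Int × Int) play =>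
      if ((PySem.Dict.mk play).get? "sack").getD none != none then
        if ((PySem.Dict.mk play).get? "defense").getD none == some winner then
          (sacks.1 + 1, sacks.2)
        else
          (sacks.1, sacks.2 + 1)
      else sacks) (a, b)
    = (a + (plays.countP (fun play =>
        ((PySem.Dict.mk play).get? "sack").getD none != none &&
        ((PySem.Dict.mk play).get? "defense").getD none == some winner) : Nat),
       b + (plays.countP (fun play =>
        ((PySem.Dict.mk play).get? "sack").getD none != none &&
        ((PySem.Dict.mk play).get? "defense").getD none != some winner) : Nat)) := by
  induction plays generalizing a b with
  | nil => simp
  | cons play rest ih =>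
    rw [List.foldl_cons]
    by_cases hs : (((PySem.Dict.mk play).get? "sack").getD none != none) = true
    · by_cases hd : (((PySem.Dict.mk play).get? "defense").getD none == some winner) = true
      · have hdp : ((PySem.Dict.mk play).get? "defense").getD none = some winner := by
          simpa using hd
        rw [if_pos hs, if_pos hd, ih]
        simp [List.countP_cons, hs, hd, hdp, Prod.ext_iff]
        omega
      · have hd' : (((PySem.Dict.mk play).get? "defense").getD none == some winner) = false :=
          Bool.eq_false_iff.mpr hd
        have hdp : ¬ ((PySem.Dict.mk play).get? "defense").getD none = some winner := by
          simpa using hd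
        rw [if_pos hs, if_neg hd, ih]
        simp [List.countP_cons, hs, hd', hdp, Prod.ext_iff]
        omega
    · have hs' : (((PySem.Dict.mk play).get? "sack").getD none != none) = false :=
        Bool.eq_false_iff.mpr hs
      rw [if_neg hs, ih]
      simp [hs']

-- ===== VERDICT (by name: the statement is the Claim_ definition above) =====
theorem count_sacks_spec : Claim_equal_count_sacks := by
  intro plays winner loser _ _
  unfold Spec_count_sacks count_sacks count_sacks_alt
  rw [count_sacks_fold]
  simp
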